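-- pv_equiv track=rewrite | github.com/Sibele-Pal/community-healthy-meal-recommender | app/src/serving/recommend.py | _is_allergy_hit
-- ===== SOURCE A (Python) =====
-- from typing import Optional, Dict, List
--
-- STRICT_ALLERGEN_KEYWORDS = {
--     "prawn": ["prawn", "shrimp"],
--     "shellfish": ["prawn", "shrimp", "lobster", "crab"],
--     "nuts": ["nut", "peanut", "almond", "cashew", "walnut", "hazelnut", "pistachio"],
--     "peanut": ["peanut", "groundnut"],
--     "dairy": ["milk", "cheese", "butter", "yoghurt", "yogurt", "cream"],
--     # add more if you want
-- }
--
-- def _is_allergy_hit(food_text: str, allergy_tokens: List[str]) -> bool: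
--     """Returns True if this food_text should be banned because of allergies."""
--     if not allergy_tokens:
--         return False
--     if not food_text:
--         return False
--
--     food_text = food_text.lower()
--
--     for token in allergy_tokens:
--         if token in STRICT_ALLERGEN_KEYWORDS:
--             for kw in STRICT_ALLERGEN_KEYWORDS[token]:
--                 if kw in food_text:
--                     return True
--         else:
--             if token and token in food_text:
--                 return True
--     return False
-- ===== SOURCE B (Python) =====
-- from typing import List
--
-- STRICT_ALLERGEN_KEYWORDS = {
--     "prawn": ["prawn", "shrimp"],
--     "shellfish": ["prawn", "shrimp", "lobster", "crab"],
--     "nuts": ["nut", "peanut", "almond", "cashew", "walnut", "hazelnut", "pistachio"],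
--     "peanut": ["peanut", "groundnut"],
--     "dairy": ["milk", "cheese", "butter", "yoghurt", "yogurt", "cream"],
-- }
--
-- def _is_allergy_hit(food_text: str, allergy_tokens: List[str]) -> bool:
--     if not allergy_tokens:
--         return False
--     if not food_text:
--         return False
--     terms: List[str] = []
--     for token in allergy_tokens:
--         if token in STRICT_ALLERGEN_KEYWORDS:
--             terms.extend(STRICT_ALLERGEN_KEYWORDS[token])
--         elif token:
--             terms.append(token)
--     text = food_text.lower()
--     term_tuple = tuple(terms)
--     # naive matcher: scan each starting position of the text once;
--     # startswith with a tuple tests whether any term begins at i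
--     for i in range(len(text)):
--         if text.startswith(term_tuple, i):
--             return True
--     return False
-- ===== Notes on version B (the rewrite author's own statement) =====
-- stated objective: alternative
-- what changed: A interleaves dict lookup with built-in substring ('in') tests and early-returns inside a nested per-token loop; B first flattens the tokens into a term tuple, then runs a naive string matcher: one scan over the text's starting positions, testing at each index whether any term starts there via startswith(term_tuple, i), instead of calling 'in' per keyword.
import Mathlib
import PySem

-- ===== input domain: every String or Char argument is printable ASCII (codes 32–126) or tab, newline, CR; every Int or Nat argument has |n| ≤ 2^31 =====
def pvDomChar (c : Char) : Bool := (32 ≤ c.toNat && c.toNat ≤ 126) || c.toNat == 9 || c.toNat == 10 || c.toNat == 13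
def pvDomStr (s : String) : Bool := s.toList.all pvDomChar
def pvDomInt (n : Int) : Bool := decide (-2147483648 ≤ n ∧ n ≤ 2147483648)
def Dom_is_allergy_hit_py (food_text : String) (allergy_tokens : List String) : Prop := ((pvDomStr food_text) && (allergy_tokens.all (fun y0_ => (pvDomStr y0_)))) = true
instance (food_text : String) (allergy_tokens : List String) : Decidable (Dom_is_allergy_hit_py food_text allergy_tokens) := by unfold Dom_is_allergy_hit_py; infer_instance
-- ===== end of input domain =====

-- B flattens the tokens into a term list and then runs a naive position-scan matcher over the
-- text (startswith at each index) instead of A's per-token 'in' tests with early return. Objective: alternative.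

-- ===== PORT A =====
-- module-level constant STRICT_ALLERGEN_KEYWORDS (shared by both programs)
def strictAllergenKeywords : PySem.Dict String (List String) := PySem.Dict.ofList
  [("prawn", ["prawn", "shrimp"]),
   ("shellfish", ["prawn", "shrimp", "lobster", "crab"]),
   ("nuts", ["nut", "peanut", "almond", "cashew", "walnut", "hazelnut", "pistachio"]),
   ("peanut", ["peanut", "groundnut"]),
   ("dairy", ["milk", "cheese", "butter", "yoghurt", "yogurt", "cream"])]

-- A's 'for token in allergy_tokens' loop, with its early returns
def hitLoopA (food_text : String) : List String → Bool
  | [] => false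
  | token :: rest =>
    match PySem.Dict.get? strictAllergenKeywords token with
    | some kws =>
      -- inner 'for kw in …: if kw in food_text: return True'
      if kws.any (fun kw => PySem.Str.isIn kw food_text) then true else hitLoopA food_text rest
    | none =>
      if token ≠ "" && PySem.Str.isIn token food_text then true else hitLoopA food_text rest

def is_allergy_hit_py (food_text : String) (allergy_tokens : List String) : Bool :=
  if allergy_tokens = [] then false
  else if food_text = "" then false
  else hitLoopA (PySem.Str.lower food_text) allergy_tokens

-- ===== PORT B =====
-- B's collection pass: the flat list of search terms
def collectTermsB : List String → List String
  | [] => []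
  | token :: rest =>
    match PySem.Dict.get? strictAllergenKeywords token with
    | some kws => kws ++ collectTermsB rest
    | none =>
      if token ≠ "" then token :: collectTermsB rest else collectTermsB rest

-- Python 'text.startswith(t, i)' for 0 ≤ i < len(text): exact as prefix test on the drop;
-- B's 'text.startswith(term_tuple, i)' is this test any-ed over the tuple's elements
def startsAtB (text : List Char) (i : Nat) (t : String) : Bool :=
  t.toList.isPrefixOf (text.drop i)

def is_allergy_hit_py_alt (food_text : String) (allergy_tokens : List String) : Bool :=
  if allergy_tokens = [] then false
  else if food_text = "" then false
  else
    let terms := collectTermsB allergy_tokens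
    let text := (PySem.Str.lower food_text).toList
    -- 'for i in range(len(text)): if text.startswith(term_tuple, i): return True'
    -- (tuple startswith = does any term start at i)
    (List.range text.length).any (fun i => terms.any (fun t => startsAtB text i t))

-- ===== PRECONDITION & SPEC =====
def Spec_is_allergy_hit_py (food_text : String) (allergy_tokens : List String) (out : Bool) : Prop := out = is_allergy_hit_py_alt food_text allergy_tokens
instance (food_text : String) (allergy_tokens : List String) (out : Bool) : Decidable (Spec_is_allergy_hit_py food_text allergy_tokens out) := by unfold Spec_is_allergy_hit_py; infer_instance

-- ===== CLAIM (what is proved, stated in full; the proofs are below) =====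
def Claim_equal_is_allergy_hit_py : Prop := ∀ (food_text : String) (allergy_tokens : List String), Dom_is_allergy_hit_py food_text allergy_tokens → Spec_is_allergy_hit_py food_text allergy_tokens (is_allergy_hit_py food_text allergy_tokens)

-- ===== LEMMAS AND PROOFS =====
-- A's loop equals one containment test per collected term
theorem hitLoopA_eq_any_collect (food_text : String) (toks : List String) :
    hitLoopA food_text toks
      = (collectTermsB toks).any (fun kw => PySem.Str.isIn kw food_text) := by
  induction toks with
  | nil => rfl
  | cons token rest ih =>
    simp only [hitLoopA, collectTermsB]
    cases PySem.Dict.get? strictAllergenKeywords token with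
    | some kws =>
      rw [List.any_append, ih]
      simp only [List.any_eq]
      cases decide (∃ x ∈ kws, PySem.Str.isIn x food_text = true) <;> simp
    | none =>
      by_cases h : token = "" <;> simp [h, ih]

-- on a nonempty text, 'sub in text' equals the position scan
theorem isIn_eq_range_any (t text : String) (hs : text.toList ≠ []) :
    PySem.Str.isIn t text
      = (List.range text.toList.length).any (fun i => startsAtB text.toList i t) := by
  rw [Bool.eq_iff_iff, PySem.Str.isIn_iff_infix]
  simp only [List.any_eq, decide_eq_true_eq, List.mem_range, startsAtB,
    List.isPrefixOf_iff_prefix]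
  rw [← PySem.Chars.isIn_iff_infix, ← PySem.Chars.exists_prefix_drop_iff_isIn]
  constructor
  · rintro ⟨j, hj⟩
    by_cases hlt : j < text.toList.length
    · exact ⟨j, hlt, hj⟩
    · have hd : text.toList.drop j = [] := List.drop_eq_nil_of_le (by omega)
      rw [hd] at hj
      have ht : t.toList = [] := List.prefix_nil.mp hj
      exact ⟨0, List.length_pos_of_ne_nil hs, by simp [ht]⟩
  · rintro ⟨i, _, h⟩
    exact ⟨i, h⟩

-- swapping the two 'any's
theorem any_swap {α β : Type} (xs : List α) (ys : List β) (p : α → β → Bool) :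
    xs.any (fun x => ys.any (fun y => p x y)) = ys.any (fun y => xs.any (fun x => p x y)) := by
  rw [Bool.eq_iff_iff]
  simp only [List.any_eq, decide_eq_true_eq]
  constructor
  · rintro ⟨x, hx, y, hy, h⟩; exact ⟨y, hy, x, hx, h⟩
  · rintro ⟨y, hy, x, hx, h⟩; exact ⟨x, hx, y, hy, h⟩

-- ===== VERDICT (by name: the statement is the Claim_ definition above) =====
theorem is_allergy_hit_py_spec : Claim_equal_is_allergy_hit_py := by
  intro food_text allergy_tokens _
  unfold Spec_is_allergy_hit_py is_allergy_hit_py is_allergy_hit_py_alt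
  split_ifs with h1 h2
  · rfl
  · rfl
  · have hne : (PySem.Str.lower food_text).toList ≠ [] := by
      simp only [PySem.Str.toList_lower, PySem.Chars.lower]
      simpa using h2
    rw [hitLoopA_eq_any_collect, any_swap]
    exact List.any_congr rfl (fun t => isIn_eq_range_any t (PySem.Str.lower food_text) hne)
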